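-- pv_equiv track=rewrite | github.com/umass-ml4ed/socratic-quest-gen | create_preference_dataset.py | construct_preference_data
-- ===== SOURCE A (Python) =====
-- def process_assistant_turn(current_turn_good_outputs):
--     '''
--     split assistant turn using <alt> tabs
--     '''
--     current_turn_good_outputs = current_turn_good_outputs.strip('Assistant:')
--     good_outputs = current_turn_good_outputs.split('<alt>')
--     good_outputs = [x.strip() for x in good_outputs]
--     return good_outputs
--
-- def create_preference_data(good_outputs_list, valid_bad_questions):
--     '''
--     create preference data
--     '''
--     preference_data = []
--     for good_output in good_outputs_list:
--         # iterate over valid bad questions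
--         for bad_question in valid_bad_questions:
--             preference_data.append([good_output, bad_question])
--     return preference_data
--
-- def process_turn(turn):
--     '''
--     add a \n before every Assistant utterance
--     '''
--     turn = turn.replace('Assistant:', '\nAssistant:')
--     return turn
--
-- def construct_preference_data(turns, valid_bad_questions=None, split_path='train'):
--     '''
--     construct the input prompts and preference data
--     '''
--     all_input_data = []
--     all_good_outputs = []
--     all_preference_data = []
--     for ctr, turn in enumerate(turns):
--         # strip the Assistant turn
--         current_turn_prompt = turn[:turn.find('Assistant:')].strip()
--         # current turn good outputs
--         current_turn_good_outputs = turn[turn.find('Assistant:'):].strip()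
--         # process good outputs
--         good_outputs_list = process_assistant_turn(current_turn_good_outputs)
--         # iterate over all previous turns
--         all_prev_turns = ''
--         for prev_turn in turns[:ctr]:
--             all_prev_turns += process_turn(prev_turn) + '\n'
--         # construct input data
--         input_data = all_prev_turns + current_turn_prompt + '\nSocratic Guiding Assistant: '
--         # append data
--         all_input_data.append(input_data)
--         all_good_outputs.append(good_outputs_list)
--
--         # preference data
--         if split_path == 'train':
--             # construct preference data
--             preference_data = create_preference_data(good_outputs_list, valid_bad_questions[ctr])
--             all_preference_data.append(preference_data)
--
--     return all_input_data, all_good_outputs, all_preference_data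
-- ===== SOURCE B (Python) =====
-- def construct_preference_data(turns, valid_bad_questions=None, split_path='train'):
--     '''
--     construct the input prompts and preference data (single pass, running prefix)
--     '''
--     all_input_data = []
--     all_good_outputs = []
--     all_preference_data = []
--     train = split_path == 'train'
--     prefix = ''
--     for ctr, turn in enumerate(turns):
--         cut = turn.find('Assistant:')
--         prompt = turn[:cut].strip()
--         good_outputs_list = [x.strip() for x in turn[cut:].strip().strip('Assistant:').split('<alt>')]
--         all_input_data.append(prefix + prompt + '\nSocratic Guiding Assistant: ')
--         all_good_outputs.append(good_outputs_list)
--         if train: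
--             bads = valid_bad_questions[ctr]
--             all_preference_data.append([[g, b] for g in good_outputs_list for b in bads])
--         prefix += turn.replace('Assistant:', '\nAssistant:') + '\n'
--     return all_input_data, all_good_outputs, all_preference_data
-- ===== Notes on version B (the rewrite author's own statement) =====
-- stated objective: faster
-- what changed: B keeps one running prefix of processed previous turns and appends to it per turn instead of rebuilding the whole previous-turns string from scratch at every iteration, and replaces the nested append loops for preference pairs with a comprehension.
import Mathlib
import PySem

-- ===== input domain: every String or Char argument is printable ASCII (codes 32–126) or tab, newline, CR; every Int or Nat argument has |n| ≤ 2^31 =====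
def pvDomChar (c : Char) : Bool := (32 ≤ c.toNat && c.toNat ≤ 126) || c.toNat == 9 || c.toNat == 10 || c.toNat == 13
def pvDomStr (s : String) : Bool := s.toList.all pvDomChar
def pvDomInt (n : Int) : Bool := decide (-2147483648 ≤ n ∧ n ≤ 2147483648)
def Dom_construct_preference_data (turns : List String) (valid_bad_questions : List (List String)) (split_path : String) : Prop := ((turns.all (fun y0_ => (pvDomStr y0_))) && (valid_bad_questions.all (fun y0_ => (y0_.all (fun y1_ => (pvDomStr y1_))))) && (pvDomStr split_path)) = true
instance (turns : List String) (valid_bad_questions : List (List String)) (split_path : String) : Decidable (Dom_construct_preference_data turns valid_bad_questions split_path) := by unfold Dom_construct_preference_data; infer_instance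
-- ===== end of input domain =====

-- B replaces A's quadratic per-turn rebuild of the previous-turns string by a single running prefix
-- (and the nested append loops by comprehensions): asymptotically faster, same values.


-- ===== PORT A =====
-- s.strip('Assistant:') then split('<alt>'); the separator '<alt>' is a nonempty literal, so split? is always some
def pvProcessAssistantTurn (s : String) : List String :=
  ((PySem.Str.split? (PySem.Str.stripChars s "Assistant:") "<alt>").getD []).map PySem.Str.strip

def pvCreatePreferenceData (good_outputs_list : List String) (valid_bad_questions : List String) : List (List String) :=
  good_outputs_list.foldl (fun acc good_output =>
    valid_bad_questions.foldl (fun acc2 bad_question => acc2 ++ [[good_output, bad_question]]) acc) []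

def pvProcessTurn (turn : String) : String :=
  PySem.Str.replace turn "Assistant:" "\nAssistant:"

-- 'for ctr, turn in enumerate(turns)' as structural recursion over the remaining turns, carrying ctr
def pvLoopA (turns : List String) (valid_bad_questions : List (List String)) (split_path : String)
    (ctr : Nat) (rest : List String)
    (st : List String × List (List String) × List (List (List String))) :
    List String × List (List String) × List (List (List String)) :=
  match rest with
  | [] => st
  | turn :: rest' =>
    let i := PySem.Str.find turn "Assistant:"
    let current_turn_prompt := PySem.Str.strip (PySem.Str.slice turn none (some i))
    let current_turn_good_outputs := PySem.Str.strip (PySem.Str.slice turn (some i) none)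
    let good_outputs_list := pvProcessAssistantTurn current_turn_good_outputs
    let all_prev_turns := (PySem.List.slice turns none (some (ctr : Int))).foldl
        (fun acc prev_turn => acc ++ (pvProcessTurn prev_turn ++ "\n")) ""
    let input_data := all_prev_turns ++ current_turn_prompt ++ "\nSocratic Guiding Assistant: "
    let st1 := (st.1 ++ [input_data], st.2.1 ++ [good_outputs_list], st.2.2)
    let st2 := if split_path == "train" then
        -- valid_bad_questions[ctr]: the IndexError case is excluded by Pre_
        (st1.1, st1.2.1, st1.2.2 ++ [pvCreatePreferenceData good_outputs_list
          ((PySem.List.pyGet? valid_bad_questions (ctr : Int)).getD [])])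
      else st1
    pvLoopA turns valid_bad_questions split_path (ctr + 1) rest' st2

def construct_preference_data (turns : List String) (valid_bad_questions : List (List String)) (split_path : String) : List String × List (List String) × List (List (List String)) :=
  pvLoopA turns valid_bad_questions split_path 0 turns ([], [], [])

-- ===== PORT B =====
-- single pass with a running prefix of processed previous turns
def pvLoopB (valid_bad_questions : List (List String)) (train : Bool)
    (ctr : Nat) (rest : List String) (pfx : String)
    (st : List String × List (List String) × List (List (List String))) :
    List String × List (List String) × List (List (List String)) :=
  match rest with
  | [] => st
  | turn :: rest' =>
    let cut := PySem.Str.find turn "Assistant:"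
    let prompt := PySem.Str.strip (PySem.Str.slice turn none (some cut))
    let good_outputs_list :=
      ((PySem.Str.split? (PySem.Str.stripChars
          (PySem.Str.strip (PySem.Str.slice turn (some cut) none)) "Assistant:") "<alt>").getD []).map
        PySem.Str.strip
    let st1 := (st.1 ++ [pfx ++ prompt ++ "\nSocratic Guiding Assistant: "],
                st.2.1 ++ [good_outputs_list],
                if train then
                  st.2.2 ++ [good_outputs_list.flatMap (fun g =>
                    ((PySem.List.pyGet? valid_bad_questions (ctr : Int)).getD []).map (fun b => [g, b]))]
                else st.2.2)
    pvLoopB valid_bad_questions train (ctr + 1) rest'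
      (pfx ++ (PySem.Str.replace turn "Assistant:" "\nAssistant:" ++ "\n")) st1

def construct_preference_data_alt (turns : List String) (valid_bad_questions : List (List String)) (split_path : String) : List String × List (List String) × List (List (List String)) :=
  pvLoopB valid_bad_questions (split_path == "train") 0 turns "" ([], [], [])

-- ===== PRECONDITION & SPEC =====
-- Pre_ excludes exactly the inputs where Python A raises: on split_path == 'train' it indexes
-- valid_bad_questions[ctr] for every turn index ctr, an IndexError when the list is shorter than turns.
def Pre_construct_preference_data (turns : List String) (valid_bad_questions : List (List String)) (split_path : String) : Prop :=
  split_path = "train" → turns.length ≤ valid_bad_questions.length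
instance (turns : List String) (valid_bad_questions : List (List String)) (split_path : String) : Decidable (Pre_construct_preference_data turns valid_bad_questions split_path) := by unfold Pre_construct_preference_data; infer_instance

def pvWitness_construct_preference_data : List String × List (List String) × String :=
  (["User: hi Assistant: why? <alt> how?"], [["bad?"]], "train")

def Spec_construct_preference_data (turns : List String) (valid_bad_questions : List (List String)) (split_path : String) (out : List String × List (List String) × List (List (List String))) : Prop := out = construct_preference_data_alt turns valid_bad_questions split_path
instance (turns : List String) (valid_bad_questions : List (List String)) (split_path : String) (out : List String × List (List String) × List (List (List String))) : Decidable (Spec_construct_preference_data turns valid_bad_questions split_path out) := by unfold Spec_construct_preference_data; infer_instance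

-- ===== CLAIM (what is proved, stated in full; the proofs are below) =====
def Claim_equal_construct_preference_data : Prop := ∀ (turns : List String) (valid_bad_questions : List (List String)) (split_path : String), Dom_construct_preference_data turns valid_bad_questions split_path → Pre_construct_preference_data turns valid_bad_questions split_path → Spec_construct_preference_data turns valid_bad_questions split_path (construct_preference_data turns valid_bad_questions split_path)

-- ===== LEMMAS AND PROOFS =====

lemma pvCreate_eq_flatMap (g : List String) (b : List String) :
    pvCreatePreferenceData g b = g.flatMap (fun x => b.map (fun y => [x, y])) := by
  unfold pvCreatePreferenceData
  simp only [PySem.List.foldl_append_singleton_eq_map]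
  simpa using PySem.List.foldl_append_eq_flatMap (fun x => b.map (fun y => [x, y])) g []

lemma pvLoop_eq (turns : List String) (vbq : List (List String)) (sp : String) :
    ∀ (rest : List String) (ctr : Nat)
      (st : List String × List (List String) × List (List (List String))),
      turns.drop ctr = rest →
      pvLoopA turns vbq sp ctr rest st =
        pvLoopB vbq (sp == "train") ctr rest
          ((turns.take ctr).foldl (fun acc pt => acc ++ (pvProcessTurn pt ++ "\n")) "") st := by
  intro rest
  induction rest with
  | nil => intro ctr st _; simp [pvLoopA, pvLoopB]
  | cons turn rest' ih =>
    intro ctr st hdrop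
    have hget : turns[ctr]? = some turn := by
      have h0 : (List.drop ctr turns)[0]? = turns[ctr + 0]? := List.getElem?_drop
      simp only [hdrop] at h0
      simpa using h0.symm
    have htake : turns.take (ctr + 1) = turns.take ctr ++ [turn] := by
      rw [List.take_add_one, hget]; rfl
    have hdrop' : turns.drop (ctr + 1) = rest' := by
      rw [← List.drop_drop, hdrop]; rfl
    rw [pvLoopA, pvLoopB]
    rw [ih (ctr + 1) _ hdrop']
    rw [htake, List.foldl_append]
    simp only [List.foldl_cons, List.foldl_nil]
    have hslice : PySem.List.slice turns none (some (ctr : Int)) = turns.take ctr := by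
      simpa using PySem.List.slice_to_natCast turns ctr
    rw [hslice]
    simp only [pvProcessAssistantTurn, pvProcessTurn, pvCreate_eq_flatMap]
    by_cases h : sp == "train" <;> simp [h]

-- ===== VERDICT (by name: the statement is the Claim_ definition above) =====
theorem construct_preference_data_spec : Claim_equal_construct_preference_data := by
  intro turns vbq sp _ _
  unfold Spec_construct_preference_data construct_preference_data construct_preference_data_alt
  simpa using pvLoop_eq turns vbq sp turns 0 ([], [], []) rfl
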